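-- pv_equiv track=rewrite | github.com/jerperez42/piscine-python-data-0 | ex07/sos.py | isalnumorspace
-- ===== SOURCE A (Python) =====
-- def isalnumorspace(txt: str):
--     """isalnumorspace
--     """
--     for c in txt:
--         if c.isalnum():
--             pass
--         elif ' ' == c:
--             pass
--         else:
--             return False
--     return True
-- ===== SOURCE B (Python) =====
-- def isalnumorspace(txt: str):
--     """isalnumorspace"""
--     s = txt.replace(' ', '')
--     return s == '' or s.isalnum()
-- ===== Notes on version B (the rewrite author's own statement) =====
-- stated objective: simpler
-- what changed: Replaces A's per-character early-return loop with a single filter-then-predicate pass: strip literal spaces with str.replace and test the rest with str.isalnum (empty result means only spaces, hence True); the C-level string methods give a constant-factor speedup.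
import Mathlib
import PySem

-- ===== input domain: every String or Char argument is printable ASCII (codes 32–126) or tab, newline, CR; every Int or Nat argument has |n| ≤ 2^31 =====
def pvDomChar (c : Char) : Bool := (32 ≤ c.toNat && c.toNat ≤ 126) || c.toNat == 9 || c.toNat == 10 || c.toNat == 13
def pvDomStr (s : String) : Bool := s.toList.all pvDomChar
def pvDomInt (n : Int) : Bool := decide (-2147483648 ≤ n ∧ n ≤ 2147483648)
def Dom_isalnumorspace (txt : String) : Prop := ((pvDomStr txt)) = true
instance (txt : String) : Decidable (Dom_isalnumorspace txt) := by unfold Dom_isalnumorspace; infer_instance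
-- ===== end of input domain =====

-- B replaces A's per-character early-return loop with one filter-then-predicate pass
-- (strip spaces with replace, then empty-or-isalnum); objective: simpler.

-- ===== PORT A =====
-- the for-loop of A: first-bad-char early return
def pvLoopA : List Char → Bool
  | [] => true
  | c :: cs =>
    if PySem.Chars.isalnum c then pvLoopA cs
    else if ' ' == c then pvLoopA cs
    else false

def isalnumorspace (txt : String) : Bool := pvLoopA txt.toList

-- ===== PORT B =====
def isalnumorspace_alt (txt : String) : Bool :=
  let s := PySem.Str.replace txt " " ""
  (s == "") || PySem.Str.strIsalnum s

-- ===== PRECONDITION & SPEC =====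
def Spec_isalnumorspace (txt : String) (out : Bool) : Prop := out = isalnumorspace_alt txt
instance (txt : String) (out : Bool) : Decidable (Spec_isalnumorspace txt out) := by unfold Spec_isalnumorspace; infer_instance

-- ===== CLAIM (what is proved, stated in full; the proofs are below) =====
def Claim_equal_isalnumorspace : Prop := ∀ (txt : String), Dom_isalnumorspace txt → Spec_isalnumorspace txt (isalnumorspace txt)

-- ===== LEMMAS AND PROOFS =====

lemma go_space (fuel : Nat) : ∀ (l acc : List Char), l.length ≤ fuel →
    PySem.Chars.replace.go [' '] [] fuel l acc
      = acc.reverse ++ l.filter (fun c => !(c == ' ')) := by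
  induction fuel with
  | zero =>
    intro l acc h
    have : l = [] := List.length_eq_zero_iff.mp (Nat.le_zero.mp h)
    subst this
    simp [PySem.Chars.replace.go]
  | succ n ih =>
    intro l acc h
    cases l with
    | nil => simp [PySem.Chars.replace.go]
    | cons c t =>
      by_cases hc : c = ' '
      · subst hc
        rw [PySem.Chars.replace.go]
        simp only [List.isPrefixOf_cons₂, List.isPrefixOf_nil_left, beq_self_eq_true,
          Bool.and_self, if_pos]
        show PySem.Chars.replace.go [' '] [] n t acc = _
        rw [ih t acc (by simpa using Nat.le_of_succ_le_succ h)]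
        simp
      · rw [PySem.Chars.replace.go]
        have hpre : List.isPrefixOf [' '] (c :: t) = false := by
          simp [List.isPrefixOf_cons₂]
          exact fun hh => absurd hh.symm hc
        rw [hpre]
        simp only [Bool.false_eq_true, if_false]
        rw [ih t (c :: acc) (by simpa using Nat.le_of_succ_le_succ h)]
        simp [hc]

lemma replace_space (l : List Char) :
    PySem.Chars.replace l [' '] [] = l.filter (fun c => !(c == ' ')) := by
  rw [PySem.Chars.replace]
  simp only [List.isEmpty_cons, Bool.false_eq_true, if_false]
  simpa using go_space l.length l [] le_rfl

lemma loopA_filter (l : List Char) :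
    pvLoopA l = (l.filter (fun c => !(c == ' '))).all PySem.Chars.isalnum := by
  induction l with
  | nil => rfl
  | cons c cs ih =>
    by_cases ha : PySem.Chars.isalnum c = true
    · by_cases hc : c = ' ' <;> simp [pvLoopA, ha, hc, ih]
    · by_cases hc : c = ' '
      · subst hc; simp [pvLoopA, ha, ih]
      · simp [pvLoopA, ha, hc]
        exact fun hh => absurd hh.symm hc

lemma all_of_isEmpty {p : Char → Bool} {l : List Char} (h : l.isEmpty = true) :
    l.all p = true := by
  cases l with
  | nil => rfl
  | cons a t => simp at h

-- ===== VERDICT (by name: the statement is the Claim_ definition above) =====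
theorem isalnumorspace_spec : Claim_equal_isalnumorspace := by
  intro txt _
  unfold Spec_isalnumorspace isalnumorspace isalnumorspace_alt
  show pvLoopA txt.toList =
    ((PySem.Str.replace txt " " "" == "") || PySem.Str.strIsalnum (PySem.Str.replace txt " " ""))
  have hts : (PySem.Str.replace txt " " "").toList
      = txt.toList.filter (fun c => !(c == ' ')) := by
    rw [PySem.Str.toList_replace]
    have h1 : (" " : String).toList = [' '] := rfl
    have h2 : ("" : String).toList = [] := rfl
    rw [h1, h2, replace_space]
  have hempty : ((PySem.Str.replace txt " " "") == "")
      = (PySem.Str.replace txt " " "").toList.isEmpty := by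
    rw [Bool.eq_iff_iff]
    constructor
    · intro h
      rw [beq_iff_eq.mp h]
      rfl
    · intro h
      have : (PySem.Str.replace txt " " "").toList = [] := List.isEmpty_iff.mp h
      exact beq_iff_eq.mpr (by
        apply String.ext
        simpa using this)
  rw [PySem.Str.strIsalnum_eq, PySem.Chars.strIsalnum, hempty, hts, loopA_filter]
  cases he : (txt.toList.filter (fun c => !(c == ' '))).isEmpty with
  | true => simp [he, all_of_isEmpty he]
  | false => simp [he]
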